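-- pv_equiv track=rewrite | github.com/Fondamenti18/fondamenti-di-programmazione | students/1764789/homework04/program01.py | cerca_radice
-- ===== SOURCE A (Python) =====
-- def cerca_radice(din,inizia_da=''):
--     if inizia_da == '':
--         inizia_da = list(din.keys())[0]
--     trovato = ''
--     for v in din:
--         if inizia_da in din[v]:
--             trovato = v
--             break
--     if trovato == '':
--         return inizia_da
--     else:
--         return cerca_radice(din, trovato)
-- ===== SOURCE B (Python) =====
-- def cerca_radice(din, inizia_da=''):
--     if inizia_da == '':
--         inizia_da = next(iter(din))
--     parent = {}
--     for v, children in din.items():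
--         for c in children:
--             parent.setdefault(c, v)
--     current = inizia_da
--     while current in parent:
--         current = parent[current]
--     return current
-- ===== Notes on version B (the rewrite author's own statement) =====
-- stated objective: alternative
-- what changed: A rescans the whole dict (with a din[v] lookup per key) on every step of the parent chain and recurses; B builds a child-to-parent index once with setdefault and then follows it with plain lookups in a while loop.
-- intended difference: On inputs whose upward walk meets a node whose first parent is the key '', A returns that node (its '' sentinel for 'no parent found' also fires on a real parent named ''), while B keeps following parents and returns the true root, which is the intended value. — e.g. on cerca_radice([("", ["a"]), ("a", [])], "a"): A returns "a", B returns ""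
-- outside the precondition, e.g. on cerca_radice({'': ['']}, ''): A returns '', B does not finish within the time limit
import Mathlib
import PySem

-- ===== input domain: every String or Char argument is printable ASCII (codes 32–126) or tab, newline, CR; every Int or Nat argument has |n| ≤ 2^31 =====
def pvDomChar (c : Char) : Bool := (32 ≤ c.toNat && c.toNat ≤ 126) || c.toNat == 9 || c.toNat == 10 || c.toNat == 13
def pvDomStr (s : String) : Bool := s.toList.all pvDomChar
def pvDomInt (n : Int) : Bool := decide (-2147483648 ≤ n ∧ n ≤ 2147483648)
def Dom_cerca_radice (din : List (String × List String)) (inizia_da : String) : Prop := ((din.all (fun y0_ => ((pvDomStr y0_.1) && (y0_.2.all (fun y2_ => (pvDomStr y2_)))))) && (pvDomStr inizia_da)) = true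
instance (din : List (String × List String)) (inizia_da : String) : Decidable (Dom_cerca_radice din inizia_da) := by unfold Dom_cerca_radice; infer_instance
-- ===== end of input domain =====

-- B builds a child→parent index once and walks it, instead of A's rescan of the whole dict per step;
-- on walks that meet A's '' sentinel key B returns the true root instead of stopping early (see D_ below).
-- (objective: alternative — a genuinely different algorithm; no speed claim)


-- ===== PORT A =====
-- "if inizia_da == '': inizia_da = list(din.keys())[0]" — the default-start resolution both
-- Pythons perform (A at each call, with effect only at the top; B once before its loop)
def pvStart (din : List (String × List String)) (inizia_da : String) : String :=
  if inizia_da = "" then (din.map Prod.fst).headD "" else inizia_da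

-- Python din[v]: first-match lookup in the association list (KeyError impossible: v is always a key)
def pvDinGet (din : List (String × List String)) (v : String) : List String :=
  ((din.find? (fun p => p.1 == v)).map (·.2)).getD []

-- 'for v in din: if inizia_da in din[v]: trovato = v; break' — trovato stays '' when no break fires
def pvLoopA (din : List (String × List String)) (entries : List (String × List String)) (x : String) : String :=
  match entries with
  | [] => ""
  | p :: rest => if (pvDinGet din p.1).contains x then p.1 else pvLoopA din rest x

-- A's recursion, made total with a fuel guard (Pre_ guarantees the chain ends within din.length steps)
def pvCercaA (fuel : Nat) (din : List (String × List String)) (inizia_da : String) : String :=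
  match fuel with
  | 0 => inizia_da
  | fuel + 1 =>
    let start := pvStart din inizia_da
    let trovato := pvLoopA din din start
    if trovato == "" then start else pvCercaA fuel din trovato

def cerca_radice (din : List (String × List String)) (inizia_da : String) : String :=
  pvCercaA (din.length + 1) din inizia_da

-- ===== PORT B =====
-- parent = {}; for v, children in din.items(): for c in children: parent.setdefault(c, v)
def pvBuildParent (din : List (String × List String)) : PySem.Dict String String :=
  din.foldl (fun d p => p.2.foldl (fun d c => d.setdefault c p.1) d) PySem.Dict.empty

-- while current in parent: current = parent[current]  (fuel guard; Pre_ bounds the chain)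
def pvWalkB (fuel : Nat) (parent : PySem.Dict String String) (current : String) : String :=
  match fuel with
  | 0 => current
  | fuel + 1 =>
    match parent.get? current with
    | some v => pvWalkB fuel parent v
    | none => current

def cerca_radice_alt (din : List (String × List String)) (inizia_da : String) : String :=
  let start := pvStart din inizia_da
  pvWalkB (din.length + 1) (pvBuildParent din) start

-- ===== PRECONDITION & SPEC =====
-- one step of the parent walk: to the first key whose child list contains the node
-- (B follows every such parent; A takes the same steps but also stops at its '' sentinel)
def pvStepB (din : List (String × List String)) (o : Option String) : Option String :=
  o.bind fun x => ((din.filter fun p => x ∈ p.snd).map Prod.fst).head?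

-- Pre_ excludes: (a) empty din with the '' default start (A raises IndexError); (b) inputs where the
-- parent chain cycles (A then raises RecursionError, or B fails to return where A stops at its ''
-- sentinel); (c) association lists with duplicate keys, which represent no Python dict input at all.
def Pre_cerca_radice (din : List (String × List String)) (inizia_da : String) : Prop :=
  (inizia_da = "" → din ≠ []) ∧
  (din.map (·.1)).Nodup ∧
  (pvStepB din)^[din.length + 1] (some (pvStart din inizia_da)) = none
instance (din : List (String × List String)) (inizia_da : String) : Decidable (Pre_cerca_radice din inizia_da) := by unfold Pre_cerca_radice; infer_instance

def pvWitness_cerca_radice : (List (String × List String)) × String :=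
  ([("r", ["a", "b"]), ("a", ["c"]), ("b", []), ("c", [])], "c")

-- On inputs whose upward walk meets a node whose first parent is the key '', A returns that node
-- (its '' sentinel for 'no parent found' also fires on a real parent named ''), while B keeps
-- following parents and returns the true root, which is the intended value.
def D_cerca_radice (din : List (String × List String)) (inizia_da : String) : Prop :=
  ∃ i ≤ din.length, (pvStepB din)^[i + 1] (some (pvStart din inizia_da)) = some ""
instance (din : List (String × List String)) (inizia_da : String) : Decidable (D_cerca_radice din inizia_da) := by unfold D_cerca_radice; infer_instance

def Spec_cerca_radice (din : List (String × List String)) (inizia_da : String) (out : String) : Prop := ¬ D_cerca_radice din inizia_da → out = cerca_radice_alt din inizia_da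
instance (din : List (String × List String)) (inizia_da : String) (out : String) : Decidable (Spec_cerca_radice din inizia_da out) := by unfold Spec_cerca_radice; infer_instance

def pvDiffWitness_cerca_radice : (List (String × List String)) × String :=
  ([("", ["a"]), ("a", [])], "a")
def pvDiffWitnessOut_cerca_radice : String × String := ("a", "")

-- ===== CLAIM (what is proved, stated in full; the proofs are below) =====
def Claim_unchanged_cerca_radice : Prop := ∀ (din : List (String × List String)) (inizia_da : String), Dom_cerca_radice din inizia_da → Pre_cerca_radice din inizia_da → Spec_cerca_radice din inizia_da (cerca_radice din inizia_da)
def Claim_changed_cerca_radice : Prop := Dom_cerca_radice (pvDiffWitness_cerca_radice.1) (pvDiffWitness_cerca_radice.2) ∧ Pre_cerca_radice (pvDiffWitness_cerca_radice.1) (pvDiffWitness_cerca_radice.2) ∧ D_cerca_radice (pvDiffWitness_cerca_radice.1) (pvDiffWitness_cerca_radice.2) ∧ cerca_radice (pvDiffWitness_cerca_radice.1) (pvDiffWitness_cerca_radice.2) = pvDiffWitnessOut_cerca_radice.1 ∧ cerca_radice_alt (pvDiffWitness_cerca_radice.1) (pvDiffWitness_cerca_radice.2) = pvDiffWitnessOut_cerca_radice.2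 ∧ pvDiffWitnessOut_cerca_radice.1 ≠ pvDiffWitnessOut_cerca_radice.2
def Claim_exact_cerca_radice : Prop := ∀ (din : List (String × List String)) (inizia_da : String), Dom_cerca_radice din inizia_da → Pre_cerca_radice din inizia_da → D_cerca_radice din inizia_da → cerca_radice din inizia_da ≠ cerca_radice_alt din inizia_da

-- ===== LEMMAS AND PROOFS =====

-- first parent of x in the input: the first key whose child list contains x
def pvFP (din : List (String × List String)) (x : String) : Option String :=
  ((din.filter fun p => x ∈ p.snd).map Prod.fst).head?

-- one applied step is exactly the first-parent lookup
theorem pvStepB_some (din : List (String × List String)) (x : String) :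
    pvStepB din (some x) = pvFP din x := rfl

-- the input-side first-parent function, in the find? form the loop lemmas use
theorem pvFP_eq_find (din : List (String × List String)) (x : String) :
    pvFP din x = (din.find? (fun p => p.2.contains x)).map (·.1) := by
  rw [pvFP, List.head?_map, List.head?_filter]
  simp

-- with unique keys, din[p.1] is p's own list for every entry p
theorem pvDinGet_of_mem (din : List (String × List String)) (p : String × List String)
    (hnd : (din.map (·.1)).Nodup) (hp : p ∈ din) : pvDinGet din p.1 = p.2 := by
  induction din with
  | nil => cases hp
  | cons q rest ih =>
    simp only [List.map_cons, List.nodup_cons] at hnd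
    rcases List.mem_cons.mp hp with h | h
    · subst h; simp [pvDinGet]
    · have hne : ¬ q.1 = p.1 := by
        intro he; exact hnd.1 (he ▸ List.mem_map_of_mem (f := (·.1)) h)
      simp only [pvDinGet]
      rw [List.find?_cons_of_neg (by simpa using hne)]
      exact ih hnd.2 h

-- A's inner scan computes the first key whose (looked-up) child list contains x
theorem pvLoopA_eq_find (din entries : List (String × List String)) (x : String)
    (h : ∀ p ∈ entries, pvDinGet din p.1 = p.2) :
    pvLoopA din entries x = ((entries.find? (fun p => p.2.contains x)).map (·.1)).getD "" := by
  induction entries with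
  | nil => simp [pvLoopA]
  | cons p rest ih =>
    have hp : pvDinGet din p.1 = p.2 := h p (List.mem_cons_self ..)
    by_cases hc : p.2.contains x = true
    · have hc' : x ∈ p.2 := by simpa using hc
      simp [pvLoopA, hp, hc']
    · simp only [pvLoopA, hp, hc, Bool.false_eq_true, if_false]
      rw [List.find?_cons_of_neg (a := p) (l := rest) hc]
      exact ih (fun q hq => h q (List.mem_cons_of_mem _ hq))

-- the inner setdefault loop: at key x it writes v only if x is a fresh child
theorem pvInner_get? (cs : List String) (v : String) (d : PySem.Dict String String) (x : String) :
    (cs.foldl (fun d c => d.setdefault c v) d).get? x =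
      if d.get? x = none ∧ cs.contains x then some v else d.get? x := by
  induction cs generalizing d with
  | nil => simp
  | cons c rest ih =>
    simp only [List.foldl_cons, ih]
    by_cases hcx : c = x
    · subst hcx
      by_cases hd : d.get? c = none
      · rw [PySem.Dict.setdefault_of_not_contains d v
            (by rw [PySem.Dict.contains_eq_isSome_get?, hd]; rfl)]
        simp [PySem.Dict.get?_insert_self, hd]
      · rw [PySem.Dict.setdefault_of_contains d v
            (by rw [PySem.Dict.contains_eq_isSome_get?]; exact Option.isSome_iff_ne_none.mpr hd)]
        simp [hd]
    · have hxc : ¬ x = c := fun h => hcx h.symm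
      have hset : (d.setdefault c v).get? x = d.get? x := by
        by_cases hc : d.contains c = true
        · rw [PySem.Dict.setdefault_of_contains d v hc]
        · rw [PySem.Dict.setdefault_of_not_contains d v (by simpa using hc)]
          exact PySem.Dict.get?_insert_of_ne d v hxc
      simp [hset, hxc]

-- the whole index: parent.get? x is the first key whose child list contains x
theorem pvBuild_get?_aux (din : List (String × List String)) (d : PySem.Dict String String) (x : String) :
    (din.foldl (fun d p => p.2.foldl (fun d c => d.setdefault c p.1) d) d).get? x =
      ((d.get? x).orElse (fun _ => (din.find? (fun p => p.2.contains x)).map (·.1))) := by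
  induction din generalizing d with
  | nil => cases h : d.get? x <;> simp [h, Option.orElse]
  | cons p rest ih =>
    simp only [List.foldl_cons, ih, pvInner_get?, List.find?_cons]
    by_cases hd : d.get? x = none <;> by_cases hc : x ∈ p.2
    · simp [hd, hc, Option.orElse]
    · simp [hd, hc, Option.orElse]
    · cases h : d.get? x <;> simp_all [Option.orElse]
    · cases h : d.get? x <;> simp_all [Option.orElse]

theorem pvBuild_get? (din : List (String × List String)) (x : String) :
    (pvBuildParent din).get? x = pvFP din x := by
  rw [pvFP_eq_find]
  simp [pvBuildParent, pvBuild_get?_aux, Option.orElse, PySem.Dict.get?_empty]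

-- the walk never revives: once the chain is exhausted it stays exhausted
theorem pvStepB_iterate_none (din : List (String × List String)) (k : Nat) :
    (pvStepB din)^[k] none = none :=
  Function.iterate_fixed rfl k

-- one-step unfoldings of the two fuel loops
theorem pvCercaA_succ (fuel : Nat) (din : List (String × List String)) (y : String) :
    pvCercaA (fuel + 1) din y =
      (let start := pvStart din y
       let trovato := pvLoopA din din start
       if trovato == "" then start else pvCercaA fuel din trovato) := rfl

theorem pvWalkB_succ (fuel : Nat) (pm : PySem.Dict String String) (x : String) :
    pvWalkB (fuel + 1) pm x =
      (match pm.get? x with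
       | some v => pvWalkB fuel pm v
       | none => x) := rfl

-- both walks agree step by step as long as no '' parent is met:
-- y is A's raw argument, x the start it resolves to
theorem pvWalk_eq (fuel : Nat) (din : List (String × List String)) (y x : String)
    (hnd : (din.map (·.1)).Nodup)
    (hy : pvStart din y = x)
    (hnohit : ∀ i, ((pvStepB din)^[i] (some x)).bind (pvFP din) ≠ some "") :
    pvCercaA (fuel + 1) din y = pvWalkB (fuel + 1) (pvBuildParent din) x := by
  induction fuel generalizing y x with
  | zero =>
    have hloop : pvLoopA din din x = (pvFP din x).getD "" := by
      rw [pvLoopA_eq_find din din x (fun p hp => pvDinGet_of_mem din p hnd hp), pvFP_eq_find]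
    rw [pvCercaA_succ, pvWalkB_succ]
    simp only [pvBuild_get?]
    rw [hy, hloop]
    cases hf : pvFP din x with
    | none => simp
    | some v =>
      have hv : v ≠ "" := by
        intro he; apply hnohit 0; simp [hf, he]
      simp only [Option.getD_some]
      rw [if_neg (by simpa using hv)]
      rfl
  | succ fuel ih =>
    have hloop : pvLoopA din din x = (pvFP din x).getD "" := by
      rw [pvLoopA_eq_find din din x (fun p hp => pvDinGet_of_mem din p hnd hp), pvFP_eq_find]
    rw [pvCercaA_succ, pvWalkB_succ]
    simp only [pvBuild_get?]
    rw [hy, hloop]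
    cases hf : pvFP din x with
    | none => simp
    | some v =>
      have hv : v ≠ "" := by
        intro he; apply hnohit 0; simp [hf, he]
      have hstep : pvStepB din (some x) = some v := (pvStepB_some din x).trans hf
      simp only [Option.getD_some]
      rw [if_neg (by simpa using hv)]
      exact ih v v (by simp [pvStart, hv])
        (fun i => by
          have h := hnohit (i + 1)
          rwa [Function.iterate_succ_apply, hstep] at h)

-- under D_, A's result still has a recorded parent (the '' key) …
theorem pvCercaA_hits (fuel : Nat) (din : List (String × List String)) (y x : String)
    (hnd : (din.map (·.1)).Nodup)
    (hy : pvStart din y = x)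
    (hterm : (pvStepB din)^[fuel] (some x) = none)
    (hhit : ∃ i, ((pvStepB din)^[i] (some x)).bind (pvFP din) = some "") :
    pvFP din (pvCercaA fuel din y) = some "" := by
  induction fuel generalizing y x with
  | zero => simp at hterm
  | succ fuel ih =>
    have hloop : pvLoopA din din x = (pvFP din x).getD "" := by
      rw [pvLoopA_eq_find din din x (fun p hp => pvDinGet_of_mem din p hnd hp), pvFP_eq_find]
    rw [pvCercaA_succ]
    simp only []
    rw [hy, hloop]
    cases hf : pvFP din x with
    | none =>
      obtain ⟨i, hi⟩ := hhit
      cases i with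
      | zero => simp [hf] at hi
      | succ j =>
        rw [Function.iterate_succ_apply,
            show pvStepB din (some x) = none from (pvStepB_some din x).trans hf,
            pvStepB_iterate_none] at hi
        simp at hi
    | some v =>
      by_cases hv : v = ""
      · subst hv
        simpa using hf
      · have hstep : pvStepB din (some x) = some v := (pvStepB_some din x).trans hf
        simp only [Option.getD_some]
        rw [if_neg (by simpa using hv)]
        refine ih v v (by simp [pvStart, hv]) ?_ ?_
        · rwa [Function.iterate_succ_apply, hstep] at hterm
        · obtain ⟨i, hi⟩ := hhit
          cases i with
          | zero => simp [hf, hv] at hi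
          | succ j =>
            rw [Function.iterate_succ_apply, hstep] at hi
            exact ⟨j, hi⟩

-- … while B's result never has one
theorem pvWalkB_root (fuel : Nat) (din : List (String × List String)) (x : String)
    (hterm : (pvStepB din)^[fuel] (some x) = none) :
    pvFP din (pvWalkB fuel (pvBuildParent din) x) = none := by
  induction fuel generalizing x with
  | zero => simp at hterm
  | succ fuel ih =>
    rw [pvWalkB_succ]
    simp only [pvBuild_get?]
    cases hf : pvFP din x with
    | none => exact hf
    | some v =>
      have hstep : pvStepB din (some x) = some v := (pvStepB_some din x).trans hf
      exact ih v (by rwa [Function.iterate_succ_apply, hstep] at hterm)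

-- ===== VERDICT (by name: the statement is the Claim_ definition above) =====
theorem cerca_radice_spec : Claim_unchanged_cerca_radice := by
  intro din inizia_da _ hpre hnD
  obtain ⟨hne, hnd, htermB⟩ := hpre
  unfold D_cerca_radice at hnD
  push Not at hnD
  have hnohit : ∀ i, ((pvStepB din)^[i] (some (pvStart din inizia_da))).bind (pvFP din) ≠ some "" := by
    intro i h
    rcases Nat.lt_or_ge i (din.length + 1) with hi | hi
    · exact hnD i (Nat.lt_succ_iff.mp hi) (by
        rw [Function.iterate_succ_apply' (pvStepB din) i (some (pvStart din inizia_da))]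
        exact h)
    · obtain ⟨k, hk⟩ := Nat.exists_eq_add_of_le hi
      rw [hk, Nat.add_comm, Function.iterate_add_apply, htermB, pvStepB_iterate_none] at h
      simp at h
  exact pvWalk_eq din.length din inizia_da (pvStart din inizia_da) hnd rfl hnohit

theorem cerca_radice_changed : Claim_changed_cerca_radice := by
  unfold Claim_changed_cerca_radice; decide

theorem cerca_radice_tight : Claim_exact_cerca_radice := by
  intro din inizia_da _ hpre hD heq
  obtain ⟨hne, hnd, htermB⟩ := hpre
  obtain ⟨i, _, hi⟩ := hD
  have hA : pvFP din (cerca_radice din inizia_da) = some "" :=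
    pvCercaA_hits (din.length + 1) din inizia_da (pvStart din inizia_da) hnd rfl htermB
      ⟨i, by
        show pvStepB din ((pvStepB din)^[i] (some (pvStart din inizia_da))) = some ""
        rw [← Function.iterate_succ_apply' (pvStepB din) i (some (pvStart din inizia_da))]
        exact hi⟩
  have hB : pvFP din (cerca_radice_alt din inizia_da) = none :=
    pvWalkB_root (din.length + 1) din (pvStart din inizia_da) htermB
  rw [heq, hB] at hA
  cases hA
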